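-- pv_equiv track=rewrite | github.com/tomputer-g/16891-HW2 | single_agent_planner.py | is_valid_motion
-- ===== SOURCE A (Python) =====
-- from typing import Any, Dict, List, Tuple, Set
--
-- def is_valid_motion(old_loc, new_loc: List[Tuple[int]]):
--     ##############################
--     # Task 1.3/1.4: Check if a move from old_loc to new_loc is valid
--     # Check if two agents are in the same location (vertex collision)
--
--     num_agents = len(old_loc)
--     vertex_occupied_new_loc: Set = set(new_loc)
--     if len(vertex_occupied_new_loc) < num_agents:
--         # This means there were duplicates removed when constructing a set, therefore a vertex was occupied at the same time by two agents
--         return False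
--
--     # Check edge collision
--     for i in range(num_agents):
--         for j in range(i + 1, num_agents):
--             if old_loc[i] == new_loc[j] and old_loc[j] == new_loc[i]:
--                 # Edge collision detected, two agents swapped places
--                 return False
--
--     return True
-- ===== SOURCE B (Python) =====
-- def is_valid_motion(old_loc, new_loc):
--     num_agents = len(old_loc)
--     if len(set(new_loc)) < num_agents:
--         return False
--     # Count each (old, new) transition once, then detect a swap partner in O(1)
--     pair_count = {}
--     for i in range(num_agents):
--         p = (old_loc[i], new_loc[i])
--         pair_count[p] = pair_count.get(p, 0) + 1
--     for i in range(num_agents):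
--         o, w = old_loc[i], new_loc[i]
--         if o != w:
--             if (w, o) in pair_count:
--                 return False
--         elif pair_count[(o, o)] >= 2:
--             return False
--     return True
-- ===== Notes on version B (the rewrite author's own statement) =====
-- stated objective: faster
-- what changed: Replaces A's O(n^2) all-pairs edge-collision scan by a single pass that counts each (old,new) transition pair in a dictionary and then looks up the reversed pair (or a count >= 2 for stationary agents) in O(1) per agent.
import Mathlib
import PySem

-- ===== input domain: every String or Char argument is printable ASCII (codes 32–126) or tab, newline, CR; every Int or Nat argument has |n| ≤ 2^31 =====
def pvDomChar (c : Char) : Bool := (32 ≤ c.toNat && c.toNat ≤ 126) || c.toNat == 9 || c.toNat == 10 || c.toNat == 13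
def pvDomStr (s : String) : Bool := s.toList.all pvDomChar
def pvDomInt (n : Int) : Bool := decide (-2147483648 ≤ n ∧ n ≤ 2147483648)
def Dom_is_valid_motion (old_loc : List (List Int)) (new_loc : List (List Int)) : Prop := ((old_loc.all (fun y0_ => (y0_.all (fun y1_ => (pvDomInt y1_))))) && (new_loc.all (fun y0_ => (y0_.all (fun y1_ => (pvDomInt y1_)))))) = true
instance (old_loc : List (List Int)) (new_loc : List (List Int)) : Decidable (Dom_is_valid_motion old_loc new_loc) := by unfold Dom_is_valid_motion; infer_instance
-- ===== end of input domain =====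

-- B replaces A's all-pairs swap scan by a counting dictionary of (old, new) transitions with O(1) swap-partner lookups (alternative/faster algorithm, same return value).

-- ===== PORT A =====
-- the nested 'for i / for j in range(i+1, …)' edge-collision scan, with early return False rendered as 'any'
def edgeScanA (old_loc : List (List Int)) (new_loc : List (List Int)) (num_agents : Nat) : Bool :=
  (PySem.List.pyRange 0 num_agents 1).any (fun i =>
    (PySem.List.pyRange (i+1) num_agents 1).any (fun j =>
      PySem.List.pyGet? old_loc i == PySem.List.pyGet? new_loc j &&
      PySem.List.pyGet? old_loc j == PySem.List.pyGet? new_loc i))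

def is_valid_motion (old_loc : List (List Int)) (new_loc : List (List Int)) : Bool :=
  let num_agents : Nat := old_loc.length
  let vertex_occupied_new_loc : PySem.Set (List Int) := PySem.Set.ofList new_loc
  if vertex_occupied_new_loc.length < num_agents then false
  else if edgeScanA old_loc new_loc num_agents then false else true

-- ===== PORT B =====
-- the 'pair_count[(old_loc[i], new_loc[i])] += 1' counting loop of Source B
def pairCountB (old_loc : List (List Int)) (new_loc : List (List Int)) (n : Nat) : PySem.Dict (List Int × List Int) Int :=
  (PySem.List.pyRange 0 n 1).foldl (fun d i =>
    let p := (PySem.List.pyGetD old_loc i [], PySem.List.pyGetD new_loc i [])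
    d.insert p (d.getD p 0 + 1)) PySem.Dict.empty

-- the per-agent O(1) swap-partner lookup loop of Source B, early return False rendered as 'any'
def edgeScanB (old_loc : List (List Int)) (new_loc : List (List Int))
    (pair_count : PySem.Dict (List Int × List Int) Int) (n : Nat) : Bool :=
  (PySem.List.pyRange 0 n 1).any (fun i =>
    let o := PySem.List.pyGetD old_loc i []
    let w := PySem.List.pyGetD new_loc i []
    if o ≠ w then pair_count.contains (w, o)
    else decide (2 ≤ pair_count.getD (o, o) 0))

def is_valid_motion_alt (old_loc : List (List Int)) (new_loc : List (List Int)) : Bool :=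
  let num_agents : Nat := old_loc.length
  if (PySem.Set.ofList new_loc).length < num_agents then false
  else
    let pair_count := pairCountB old_loc new_loc num_agents
    if edgeScanB old_loc new_loc pair_count num_agents then false else true

-- ===== PRECONDITION & SPEC =====
def Spec_is_valid_motion (old_loc : List (List Int)) (new_loc : List (List Int)) (out : Bool) : Prop := out = is_valid_motion_alt old_loc new_loc
instance (old_loc : List (List Int)) (new_loc : List (List Int)) (out : Bool) : Decidable (Spec_is_valid_motion old_loc new_loc out) := by unfold Spec_is_valid_motion; infer_instance

-- ===== CLAIM (what is proved, stated in full; the proofs are below) =====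
def Claim_equal_is_valid_motion : Prop := ∀ (old_loc : List (List Int)) (new_loc : List (List Int)), Dom_is_valid_motion old_loc new_loc → Spec_is_valid_motion old_loc new_loc (is_valid_motion old_loc new_loc)

-- ===== LEMMAS AND PROOFS =====

-- countP over range n is ≥ 2 iff two distinct indices below n satisfy the predicate
theorem two_le_countP_range (q : Nat → Bool) (n : Nat) :
    2 ≤ (List.range n).countP q ↔ ∃ i j, i < j ∧ j < n ∧ q i ∧ q j := by
  induction n with
  | zero => simp
  | succ n ih =>
    rw [List.range_succ, List.countP_append]
    constructor
    · intro h
      have hone : List.countP q [n] = (if q n = true then 1 else 0) := by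
        simp [List.countP_cons]
      rw [hone] at h
      by_cases hq : q n
      · rw [if_pos hq] at h
        rcases Nat.lt_or_ge ((List.range n).countP q) 2 with h2 | h2
        · have h1 : 0 < (List.range n).countP q := by omega
          rcases List.countP_pos_iff.mp h1 with ⟨i, hi, hqi⟩
          exact ⟨i, n, List.mem_range.mp hi, Nat.lt_succ_self n, hqi, hq⟩
        · rcases ih.mp h2 with ⟨i, j, hij, hj, hi', hj'⟩
          exact ⟨i, j, hij, by omega, hi', hj'⟩
      · rw [if_neg hq] at h
        rcases ih.mp (by omega) with ⟨i, j, hij, hj, hi', hj'⟩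
        exact ⟨i, j, hij, by omega, hi', hj'⟩
    · rintro ⟨i, j, hij, hj, hqi, hqj⟩
      rcases Nat.lt_or_ge j n with hjn | hjn
      · have := ih.mpr ⟨i, j, hij, hjn, hqi, hqj⟩
        omega
      · have hjn' : j = n := by omega
        subst hjn'
        have h1 : 0 < (List.range j).countP q :=
          List.countP_pos_iff.mpr ⟨i, List.mem_range.mpr hij, hqi⟩
        have hone : List.countP q [j] = 1 := by simp [hqj]
        omega

-- the combinatorial heart: all-pairs swap detection equals per-agent counting lookup
theorem core_equiv (O N : Nat → List Int) (n : Nat) :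
    (∃ i, i < n ∧ ∃ j, i < j ∧ j < n ∧ O i = N j ∧ O j = N i)
    ↔ (∃ i, i < n ∧
        ((O i ≠ N i ∧ (N i, O i) ∈ (List.range n).map (fun k => (O k, N k)))
         ∨ (O i = N i ∧ 2 ≤ ((List.range n).map (fun k => (O k, N k))).count (O i, N i)))) := by
  have hcount : ∀ p : List Int × List Int,
      ((List.range n).map (fun k => (O k, N k))).count p
        = (List.range n).countP (fun k => (O k, N k) == p) := by
    intro p
    rw [List.count_eq_countP, List.countP_map]
    rfl
  constructor
  · rintro ⟨i, hi, j, hij, hj, h1, h2⟩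
    by_cases heq : O i = N i
    · -- both transitions are (O i, O i): count ≥ 2 at positions i and j
      refine ⟨i, hi, Or.inr ⟨heq, ?_⟩⟩
      rw [hcount, two_le_countP_range]
      refine ⟨i, j, hij, hj, ?_, ?_⟩
      · simp [← heq]
      · have hOj : O j = O i := by rw [h2, ← heq]
        have hNj : N j = O i := by rw [← h1]
        simp [hOj, hNj, ← heq]
    · refine ⟨i, hi, Or.inl ⟨heq, ?_⟩⟩
      exact List.mem_map.mpr ⟨j, List.mem_range.mpr hj, by rw [h2, ← h1]⟩
  · rintro ⟨i, hi, h | h⟩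
    · rcases h with ⟨hne, hmem⟩
      rcases List.mem_map.mp hmem with ⟨j, hjr, hjeq⟩
      have hj : j < n := List.mem_range.mp hjr
      have hOj : O j = N i := congrArg Prod.fst hjeq
      have hNj : N j = O i := congrArg Prod.snd hjeq
      have hne' : i ≠ j := by
        rintro rfl; exact hne hOj
      rcases Nat.lt_or_ge i j with hij | hij
      · exact ⟨i, hi, j, hij, hj, hNj.symm, hOj⟩
      · have hij' : j < i := by omega
        exact ⟨j, hj, i, hij', hi, hOj, hNj.symm⟩
    · rcases h with ⟨heq, hc⟩
      rw [hcount, two_le_countP_range] at hc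
      rcases hc with ⟨a, b, hab, hb, ha', hb'⟩
      have haP : (O a, N a) = (O i, N i) := by simpa using ha'
      have hbP : (O b, N b) = (O i, N i) := by simpa using hb'
      obtain ⟨hOa, hNa⟩ := Prod.mk.inj haP
      obtain ⟨hOb, hNb⟩ := Prod.mk.inj hbP
      refine ⟨a, by omega, b, hab, hb, ?_, ?_⟩
      · rw [hOa, hNb]; exact heq
      · rw [hOb, hNa]; exact heq

-- index-conversion helpers
theorem pyGet?_in (xs : List (List Int)) (i : Int) (h0 : 0 ≤ i) (h1 : i < (xs.length : Int)) :
    PySem.List.pyGet? xs i = some (xs.getD i.toNat []) := by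
  have hk : i.toNat < xs.length := by omega
  rw [PySem.List.pyGet?_of_nonneg xs h0, List.getElem?_eq_getElem hk,
    List.getD_eq_getElem?_getD, List.getElem?_eq_getElem hk, Option.getD_some]

theorem pyGetD_in (xs : List (List Int)) (i : Int) (h0 : 0 ≤ i) (h1 : i < (xs.length : Int)) :
    PySem.List.pyGetD xs i [] = xs.getD i.toNat [] := by
  have hk : i.toNat < xs.length := by omega
  rw [PySem.List.pyGetD_eq_getElem xs [] h0 (by omega), List.getD_eq_getElem?_getD,
    List.getElem?_eq_getElem hk, Option.getD_some]

-- A's nested scan detects exactly a swap pair i < j < n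
theorem edgeScanA_iff (old_loc new_loc : List (List Int)) (hlen : old_loc.length ≤ new_loc.length) :
    edgeScanA old_loc new_loc old_loc.length = true ↔
      ∃ i, i < old_loc.length ∧ ∃ j, i < j ∧ j < old_loc.length ∧
        old_loc.getD i [] = new_loc.getD j [] ∧ old_loc.getD j [] = new_loc.getD i [] := by
  unfold edgeScanA
  rw [List.any_eq_true]
  constructor
  · rintro ⟨i, hi, hany⟩
    rw [PySem.List.mem_pyRange_one] at hi
    rw [List.any_eq_true] at hany
    obtain ⟨j, hj, hb⟩ := hany
    rw [PySem.List.mem_pyRange_one] at hj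
    rw [Bool.and_eq_true, beq_iff_eq, beq_iff_eq] at hb
    obtain ⟨hb1, hb2⟩ := hb
    rw [pyGet?_in old_loc i hi.1 (by omega), pyGet?_in new_loc j (by omega) (by omega)] at hb1
    rw [pyGet?_in old_loc j (by omega) (by omega), pyGet?_in new_loc i hi.1 (by omega)] at hb2
    exact ⟨i.toNat, by omega, j.toNat, by omega, by omega,
      Option.some.inj hb1, Option.some.inj hb2⟩
  · rintro ⟨i, hi, j, hij, hj, h1, h2⟩
    refine ⟨(i : Int), by rw [PySem.List.mem_pyRange_one]; omega, ?_⟩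
    rw [List.any_eq_true]
    refine ⟨(j : Int), by rw [PySem.List.mem_pyRange_one]; omega, ?_⟩
    rw [Bool.and_eq_true, beq_iff_eq, beq_iff_eq]
    rw [pyGet?_in old_loc i (by omega) (by omega), pyGet?_in new_loc j (by omega) (by omega),
      pyGet?_in old_loc j (by omega) (by omega), pyGet?_in new_loc i (by omega) (by omega)]
    simp only [Int.toNat_natCast]
    exact ⟨congrArg some h1, congrArg some h2⟩

-- B's dictionary is the transition-pair counter
theorem pairCountB_eq (old_loc new_loc : List (List Int)) (n : Nat) :
    pairCountB old_loc new_loc n =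
      ((List.range n).map (fun k => (old_loc.getD k ([] : List Int), new_loc.getD k []))).foldl
        (fun d p => d.insert p (d.getD p 0 + 1)) PySem.Dict.empty := by
  unfold pairCountB
  rw [PySem.List.pyRange_zero_nat, List.foldl_map, List.foldl_map]
  simp only [PySem.List.pyGetD_natCast]

-- B's per-agent loop detects exactly the counting condition
theorem edgeScanB_iff (old_loc new_loc : List (List Int)) (hlen : old_loc.length ≤ new_loc.length) :
    edgeScanB old_loc new_loc (pairCountB old_loc new_loc old_loc.length) old_loc.length = true ↔
      ∃ i, i < old_loc.length ∧
        ((old_loc.getD i [] ≠ new_loc.getD i [] ∧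
            (new_loc.getD i [], old_loc.getD i []) ∈
              (List.range old_loc.length).map (fun k => (old_loc.getD k ([] : List Int), new_loc.getD k [])))
         ∨ (old_loc.getD i [] = new_loc.getD i [] ∧
            2 ≤ ((List.range old_loc.length).map
                  (fun k => (old_loc.getD k ([] : List Int), new_loc.getD k []))).count
                (old_loc.getD i [], new_loc.getD i []))) := by
  have hcontains : ∀ p, (pairCountB old_loc new_loc old_loc.length).contains p = true ↔
      p ∈ (List.range old_loc.length).map (fun k => (old_loc.getD k ([] : List Int), new_loc.getD k [])) := by
    intro p
    rw [pairCountB_eq, PySem.Dict.contains_iff_mem_keys, PySem.Dict.keys_foldl_insert,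
      PySem.Dict.keys_empty, PySem.Set.update_nil_left, PySem.Set.mem_ofList]
  have hgetD : ∀ p, (pairCountB old_loc new_loc old_loc.length).getD p 0 =
      (((List.range old_loc.length).map
        (fun k => (old_loc.getD k ([] : List Int), new_loc.getD k []))).count p : Int) := by
    intro p
    rw [pairCountB_eq, PySem.Dict.getD_foldl_insert_add_one, PySem.Dict.getD_empty]
    ring
  unfold edgeScanB
  rw [List.any_eq_true]
  constructor
  · rintro ⟨i, hi, hb⟩
    rw [PySem.List.mem_pyRange_one] at hi
    rw [pyGetD_in old_loc i hi.1 (by omega), pyGetD_in new_loc i hi.1 (by omega)] at hb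
    refine ⟨i.toNat, by omega, ?_⟩
    by_cases hne : old_loc.getD i.toNat [] = new_loc.getD i.toNat []
    · right
      rw [if_neg (by simpa using hne), decide_eq_true_eq, hgetD] at hb
      refine ⟨hne, ?_⟩
      rw [← hne]
      exact_mod_cast hb
    · left
      rw [if_pos (by simpa using hne), hcontains] at hb
      exact ⟨hne, hb⟩
  · rintro ⟨i, hi, h⟩
    refine ⟨(i : Int), by rw [PySem.List.mem_pyRange_one]; omega, ?_⟩
    rw [pyGetD_in old_loc i (by omega) (by omega), pyGetD_in new_loc i (by omega) (by omega)]
    simp only [Int.toNat_natCast]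
    rcases h with ⟨hne, hmem⟩ | ⟨heq, hc⟩
    · rw [if_pos (by simpa using hne), hcontains]
      exact hmem
    · rw [if_neg (by simpa using heq), decide_eq_true_eq, hgetD]
      rw [heq] at hc ⊢
      exact_mod_cast hc

-- the two edge scans agree whenever new_loc is at least as long as old_loc
theorem edge_eq (old_loc new_loc : List (List Int)) (hlen : old_loc.length ≤ new_loc.length) :
    edgeScanA old_loc new_loc old_loc.length =
      edgeScanB old_loc new_loc (pairCountB old_loc new_loc old_loc.length) old_loc.length := by
  rw [Bool.eq_iff_iff, edgeScanA_iff old_loc new_loc hlen, edgeScanB_iff old_loc new_loc hlen]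
  exact core_equiv (fun k => old_loc.getD k []) (fun k => new_loc.getD k []) old_loc.length

theorem ports_eq (old_loc new_loc : List (List Int)) :
    is_valid_motion old_loc new_loc = is_valid_motion_alt old_loc new_loc := by
  unfold is_valid_motion is_valid_motion_alt
  by_cases hg : (PySem.Set.ofList new_loc).length < old_loc.length
  · simp [hg]
  · have hlen : old_loc.length ≤ new_loc.length :=
      le_trans (Nat.le_of_not_lt hg) (PySem.Set.length_ofList_le new_loc)
    simp only [if_neg hg]
    rw [edge_eq old_loc new_loc hlen]

-- ===== VERDICT (by name: the statement is the Claim_ definition above) =====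
theorem is_valid_motion_spec : Claim_equal_is_valid_motion := by
  intro old_loc new_loc _
  unfold Spec_is_valid_motion
  exact ports_eq old_loc new_loc
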